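-- pv_equiv track=rewrite | github.com/bennourines/Due_Diligence_4DS2 | preproc_nlp/question_extractor_v3.py | merge_line_fragments
-- ===== SOURCE A (Python) =====
-- from typing import List, Dict, Any, Set, Tuple, Optional
--
-- def merge_line_fragments(fragments: List[str]) -> str:
--     """Merge text fragments into a single coherent line."""
--     result = []
--     for fragment in fragments:
--         fragment = fragment.strip()
--         if not fragment:
--             continue
--         if result and not result[-1][-1] in '.?!,:;':
--             result[-1] = result[-1] + ' ' + fragment
--         else:
--             result.append(fragment)
--     return ' '.join(result)
-- ===== SOURCE B (Python) =====
-- def merge_line_fragments(fragments):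
--     """Merge text fragments into a single coherent line."""
--     return ' '.join(f for f in (frag.strip() for frag in fragments) if f)
-- ===== Notes on version B (the rewrite author's own statement) =====
-- stated objective: simpler
-- what changed: B drops A's list-of-groups state and the trailing-punctuation merge branch entirely (the branch is output-neutral: concatenating with ' ' vs joining with ' ' yield the same final string) and simply space-joins the non-empty stripped fragments in one pass.
import Mathlib
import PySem

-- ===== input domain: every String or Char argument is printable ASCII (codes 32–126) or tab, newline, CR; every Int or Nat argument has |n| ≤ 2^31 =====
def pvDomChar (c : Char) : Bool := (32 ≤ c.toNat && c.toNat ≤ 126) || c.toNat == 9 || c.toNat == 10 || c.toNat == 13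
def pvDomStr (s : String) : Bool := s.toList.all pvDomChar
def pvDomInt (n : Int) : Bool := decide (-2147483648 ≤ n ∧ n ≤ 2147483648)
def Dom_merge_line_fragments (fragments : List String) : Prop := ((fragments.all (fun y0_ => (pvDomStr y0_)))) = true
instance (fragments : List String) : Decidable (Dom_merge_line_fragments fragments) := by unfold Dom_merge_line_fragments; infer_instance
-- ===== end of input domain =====

-- B drops A's group-list state and punctuation-merge branch (output-neutral under the final space-join)
-- and simply space-joins the non-empty stripped fragments; objective: simpler.


-- ===== PORT A =====
-- membership test  result[-1][-1] in '.?!,:;'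
def pvIsPunct (c : Char) : Bool :=
  c == '.' || c == '?' || c == '!' || c == ',' || c == ':' || c == ';'

-- one iteration of A's for-loop (result is the list of merged groups, as char lists);
-- result[-1] / result[-1][-1] are reads of the last element of a list Python has
-- just checked to be truthy (and whose elements are never empty), written with getLastD.
def pvStepA (result : List (List Char)) (fragment : String) : List (List Char) :=
  let f := PySem.Chars.strip fragment.toList
  if f = [] then result
  else if !result.isEmpty && !pvIsPunct ((result.getLastD []).getLastD ' ') then
    result.dropLast ++ [(result.getLastD []) ++ ' ' :: f]
  else
    result ++ [f]

def merge_line_fragments (fragments : List String) : String :=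
  String.ofList (PySem.Chars.join [' '] (fragments.foldl pvStepA []))

-- ===== PORT B =====
def merge_line_fragments_alt (fragments : List String) : String :=
  String.ofList (PySem.Chars.join [' ']
    (((fragments.map (fun frag => PySem.Chars.strip frag.toList)).filter (fun f => !f.isEmpty))))

-- ===== PRECONDITION & SPEC =====
def Spec_merge_line_fragments (fragments : List String) (out : String) : Prop := out = merge_line_fragments_alt fragments
instance (fragments : List String) (out : String) : Decidable (Spec_merge_line_fragments fragments out) := by unfold Spec_merge_line_fragments; infer_instance

-- ===== CLAIM (what is proved, stated in full; the proofs are below) =====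
def Claim_equal_merge_line_fragments : Prop := ∀ (fragments : List String), Dom_merge_line_fragments fragments → Spec_merge_line_fragments fragments (merge_line_fragments fragments)

-- ===== LEMMAS AND PROOFS =====

-- join over an append, split into the two halves
lemma pv_join_append (sep : List Char) (as bs : List (List Char)) :
    PySem.Chars.join sep (as ++ bs) =
      if as = [] then PySem.Chars.join sep bs
      else if bs = [] then PySem.Chars.join sep as
      else PySem.Chars.join sep as ++ sep ++ PySem.Chars.join sep bs := by
  induction as with
  | nil => simp
  | cons a as ih =>
    cases as with
    | nil =>
      cases bs with
      | nil => simp [PySem.Chars.join_singleton]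
      | cons b bs => simp [PySem.Chars.join_cons_cons, PySem.Chars.join_singleton]
    | cons a' as' =>
      cases bs with
      | nil => simp
      | cons b bs' =>
        have h1 : PySem.Chars.join sep ((a :: a' :: as') ++ (b :: bs')) =
            a ++ sep ++ PySem.Chars.join sep ((a' :: as') ++ (b :: bs')) := by
          simpa using PySem.Chars.join_cons_cons sep a a' (as' ++ b :: bs')
        rw [h1, ih]
        simp [PySem.Chars.join_cons_cons, List.append_assoc]

-- merging a fragment into the last group is join-equivalent to appending it as its own group
lemma pv_merge_last_join (r' : List (List Char)) (l f : List Char) :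
    PySem.Chars.join [' '] (r' ++ [l ++ ' ' :: f]) =
      PySem.Chars.join [' '] ((r' ++ [l]) ++ [f]) := by
  rw [pv_join_append [' '] r' [l ++ ' ' :: f],
      pv_join_append [' '] (r' ++ [l]) [f],
      pv_join_append [' '] r' [l]]
  by_cases hr' : r' = []
  · simp [hr', PySem.Chars.join_singleton]
  · simp [hr', PySem.Chars.join_singleton, List.append_assoc]

-- A's loop step never empties the group list
lemma pv_step_ne_nil (r : List (List Char)) (fragment : String)
    (hf : PySem.Chars.strip fragment.toList ≠ []) : pvStepA r fragment ≠ [] := by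
  unfold pvStepA
  rw [if_neg hf]
  split <;> simp

-- A's loop step is join-equivalent to appending the stripped fragment as its own group
lemma pv_step_join (r : List (List Char)) (fragment : String)
    (hf : PySem.Chars.strip fragment.toList ≠ []) :
    PySem.Chars.join [' '] (pvStepA r fragment) =
      PySem.Chars.join [' '] (r ++ [PySem.Chars.strip fragment.toList]) := by
  unfold pvStepA
  rw [if_neg hf]
  by_cases hr : r = []
  · simp [hr]
  · obtain ⟨r', l, rfl⟩ := (List.eq_nil_or_concat r).resolve_left hr
    simp only [List.concat_eq_append, List.getLastD_concat, List.dropLast_concat]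
    by_cases hp : pvIsPunct (l.getLast?.getD ' ') = true
    · rw [if_neg (by simp [List.getLastD_eq_getLast?, hp])]
    · rw [if_pos (by simp [List.getLastD_eq_getLast?, hp])]
      exact pv_merge_last_join r' l _

-- A's whole loop, generalized over the accumulator, joins to the accumulator followed by
-- the non-empty stripped fragments
lemma pv_loop_join (fragments : List String) (r : List (List Char)) :
    PySem.Chars.join [' '] (fragments.foldl pvStepA r) =
      PySem.Chars.join [' ']
        (r ++ ((fragments.map (fun frag => PySem.Chars.strip frag.toList)).filter
                  (fun f => !f.isEmpty))) := by
  induction fragments generalizing r with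
  | nil => simp
  | cons frag rest ih =>
    simp only [List.foldl_cons, List.map_cons, List.filter_cons]
    by_cases hf : PySem.Chars.strip frag.toList = []
    · have hstep : pvStepA r frag = r := by unfold pvStepA; simp [hf]
      simp [hstep, hf, ih]
    · have hne : (!(PySem.Chars.strip frag.toList).isEmpty) = true := by
        simp [hf]
      rw [hne, if_pos rfl, ih (pvStepA r frag)]
      have h1 : PySem.Chars.join [' ']
            (pvStepA r frag ++
              (rest.map (fun frag => PySem.Chars.strip frag.toList)).filter (fun f => !f.isEmpty)) =
          PySem.Chars.join [' ']
            ((r ++ [PySem.Chars.strip frag.toList]) ++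
              (rest.map (fun frag => PySem.Chars.strip frag.toList)).filter (fun f => !f.isEmpty)) := by
        rw [pv_join_append, pv_join_append,
            if_neg (pv_step_ne_nil r frag hf),
            if_neg (List.append_ne_nil_of_right_ne_nil r (by simp))]
        by_cases hX : (rest.map (fun frag => PySem.Chars.strip frag.toList)).filter
            (fun f => !f.isEmpty) = [] <;>
          simp [hX, pv_step_join r frag hf]
      rw [h1]
      simp [List.append_assoc]

-- ===== VERDICT (by name: the statement is the Claim_ definition above) =====
theorem merge_line_fragments_spec : Claim_equal_merge_line_fragments := by
  intro fragments _
  unfold Spec_merge_line_fragments merge_line_fragments merge_line_fragments_alt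
  have := pv_loop_join fragments []
  simp only [List.nil_append] at this
  rw [this]
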